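-- pv_equiv track=rewrite | github.com/cnrooofx/CS1117 | Sem2/Lab3/functions.py | tenkSteps
-- ===== SOURCE A (Python) =====
-- def tenkSteps(stepData):
--     """
--     stepData -- Table (list of lists) with employees step counts for the week.
--     return -- The number of days with over 100,000 total steps.
--     Takes a table and returns the number of week-days on which at least 100,000
--     steps were made cumulatively by all employees.
--     """
--     # List of total steps of all employees per day
--     day_total = []
--     # Count of days with more than 100,000 steps
--     counter = 0
--     # Loop through each employee in the table
--     for employee in stepData:
--         # Index is employee number, get employees steps for the week
--         for index, steps in enumerate(employee):
--             # If day isn't already an index, append the value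
--             if index not in range(len(day_total)):
--                 day_total.append(steps)
--                 continue
--             # Otherwise add steps to the existing day in the list
--             day_total[index] += steps
--     # Counter for days with over 100,000 steps
--     for count_day in day_total:
--         if count_day > 100000:
--             counter += 1
--     return counter
-- ===== SOURCE B (Python) =====
-- from itertools import zip_longest
--
--
-- def tenkSteps(stepData):
--     return sum(1 for col in zip_longest(*stepData, fillvalue=0)
--                if sum(col) > 100000)
-- ===== Notes on version B (the rewrite author's own statement) =====
-- stated objective: simpler
-- what changed: Replaces A's row-major loop that grows/updates a running day_total list (plus a second counting pass) with a single column-major comprehension over the zip_longest-transposed table, counting columns whose sum exceeds 100000.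
import Mathlib
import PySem

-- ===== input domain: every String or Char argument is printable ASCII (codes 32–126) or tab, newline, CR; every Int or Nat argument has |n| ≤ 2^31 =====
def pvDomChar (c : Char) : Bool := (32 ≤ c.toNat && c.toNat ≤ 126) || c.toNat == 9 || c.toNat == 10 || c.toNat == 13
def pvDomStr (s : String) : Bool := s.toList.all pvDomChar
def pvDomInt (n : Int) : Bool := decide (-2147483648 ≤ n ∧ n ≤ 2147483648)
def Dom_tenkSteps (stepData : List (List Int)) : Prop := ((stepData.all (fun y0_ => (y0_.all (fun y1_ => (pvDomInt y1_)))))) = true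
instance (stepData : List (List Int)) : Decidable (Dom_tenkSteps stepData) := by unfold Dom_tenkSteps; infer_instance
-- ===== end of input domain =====

-- B replaces A's row-major accumulate-and-grow loop by a column-major pass over the
-- zip_longest-transposed table (objective: simpler). Return value only; no mutation.

-- ===== PORT A =====
-- row loop: for each employee, fold its enumerate into day_total (append or add in place)
def tenkStepsRow (dt : List Int) (employee : List Int) : List Int :=
  (PySem.List.enumerate employee 0).foldl (fun acc p =>
    if ¬ (0 ≤ p.1 ∧ p.1 < (acc.length : Int)) then acc ++ [p.2]
    else acc.set p.1.toNat (acc.getD p.1.toNat 0 + p.2)) dt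

def tenkSteps (stepData : List (List Int)) : Int :=
  let day_total := stepData.foldl tenkStepsRow []
  day_total.foldl (fun counter count_day =>
    if count_day > 100000 then counter + 1 else counter) 0

-- ===== PORT B =====
-- zip_longest(*stepData, fillvalue=0): the i-th produced tuple, for i below the longest row
def tenkSteps_alt (stepData : List (List Int)) : Int :=
  let m := stepData.foldl (fun acc r => max acc r.length) 0
  ((List.range m).map (fun i => stepData.map (fun r => r.getD i 0))).foldl
    (fun c col => if col.sum > 100000 then c + 1 else c) 0

-- ===== PRECONDITION & SPEC =====
def Spec_tenkSteps (stepData : List (List Int)) (out : Int) : Prop := out = tenkSteps_alt stepData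
instance (stepData : List (List Int)) (out : Int) : Decidable (Spec_tenkSteps stepData out) := by unfold Spec_tenkSteps; infer_instance

-- ===== CLAIM (what is proved, stated in full; the proofs are below) =====
def Claim_equal_tenkSteps : Prop := ∀ (stepData : List (List Int)), Dom_tenkSteps stepData → Spec_tenkSteps stepData (tenkSteps stepData)

-- ===== LEMMAS AND PROOFS =====

-- structural form of one row-merge: pointwise add, the longer tail kept
def zipAdd : List Int → List Int → List Int
  | [], emp => emp
  | dt, [] => dt
  | d :: dt, s :: emp => (d + s) :: zipAdd dt emp

theorem zipAdd_nil_right (dt : List Int) : zipAdd dt [] = dt := by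
  cases dt <;> rfl

theorem tenkStepsRow_aux (emp : List Int) : ∀ (pre suf : List Int),
    (PySem.List.enumerate emp (pre.length : Int)).foldl (fun acc p =>
      if ¬ (0 ≤ p.1 ∧ p.1 < (acc.length : Int)) then acc ++ [p.2]
      else acc.set p.1.toNat (acc.getD p.1.toNat 0 + p.2)) (pre ++ suf)
    = pre ++ zipAdd suf emp := by
  induction emp with
  | nil => intro pre suf; simp [PySem.List.enumerate_nil, zipAdd_nil_right]
  | cons s emp ih =>
    intro pre suf
    rw [PySem.List.enumerate_cons, List.foldl_cons]
    cases suf with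
    | nil =>
      have hc : ¬ (0 ≤ (pre.length : Int) ∧ (pre.length : Int) < ((pre ++ ([] : List Int)).length : Int)) := by
        simp
      rw [if_pos hc]
      have h1 : (pre ++ ([] : List Int)) ++ [s] = (pre ++ [s]) ++ [] := by simp
      have h2 : ((pre.length : Int) + 1) = ((pre ++ [s]).length : Int) := by
        simp
      rw [h1, h2, ih (pre ++ [s]) []]
      simp [zipAdd]
    | cons d suf' =>
      have hc : ¬ ¬ (0 ≤ (pre.length : Int) ∧ (pre.length : Int) < ((pre ++ d :: suf').length : Int)) := by
        simp
      rw [if_neg hc]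
      have hset : (pre ++ d :: suf').set ((pre.length : Int)).toNat
          ((pre ++ d :: suf').getD ((pre.length : Int)).toNat 0 + s) = (pre ++ [d + s]) ++ suf' := by
        simp [List.set_append_right, Int.add_comm]
      have h2 : ((pre.length : Int) + 1) = ((pre ++ [d + s]).length : Int) := by simp
      rw [hset, h2, ih (pre ++ [d + s]) suf']
      simp [zipAdd]

theorem tenkStepsRow_eq (dt emp : List Int) : tenkStepsRow dt emp = zipAdd dt emp := by
  have := tenkStepsRow_aux emp [] dt
  simpa [tenkStepsRow] using this

theorem zipAdd_length (a : List Int) : ∀ b, (zipAdd a b).length = max a.length b.length := by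
  induction a with
  | nil => intro b; simp [zipAdd]
  | cons d a ih =>
    intro b
    cases b with
    | nil => simp [zipAdd]
    | cons s b => simp [zipAdd, ih]

theorem zipAdd_getD (a : List Int) : ∀ b (i : Nat),
    (zipAdd a b).getD i 0 = a.getD i 0 + b.getD i 0 := by
  induction a with
  | nil => intro b i; simp [zipAdd]
  | cons d a ih =>
    intro b i
    cases b with
    | nil => simp [zipAdd]
    | cons s b =>
      cases i with
      | zero => simp [zipAdd]
      | succ n => simpa [zipAdd, List.getD] using ih b n

theorem fold_zipAdd_length (rows : List (List Int)) : ∀ (dt : List Int),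
    (rows.foldl zipAdd dt).length = rows.foldl (fun m r => max m r.length) dt.length := by
  induction rows with
  | nil => intro dt; rfl
  | cons r rows ih =>
    intro dt
    simp only [List.foldl_cons]
    rw [ih (zipAdd dt r), zipAdd_length]

theorem fold_zipAdd_getD (rows : List (List Int)) : ∀ (dt : List Int) (i : Nat),
    (rows.foldl zipAdd dt).getD i 0 = dt.getD i 0 + (rows.map (fun r => r.getD i 0)).sum := by
  induction rows with
  | nil => intro dt i; simp
  | cons r rows ih =>
    intro dt i
    simp only [List.foldl_cons, List.map_cons, List.sum_cons]
    rw [ih (zipAdd dt r) i, zipAdd_getD]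
    ring

theorem day_total_eq (stepData : List (List Int)) :
    stepData.foldl zipAdd [] =
      (List.range (stepData.foldl (fun acc r => max acc r.length) 0)).map
        (fun i => (stepData.map (fun r => r.getD i 0)).sum) := by
  apply List.ext_getElem
  · rw [fold_zipAdd_length]; simp
  · intro i h1 h2
    have hlen : (stepData.foldl zipAdd []).length = stepData.foldl (fun acc r => max acc r.length) 0 := by
      rw [fold_zipAdd_length]; rfl
    have hi : i < stepData.foldl (fun acc r => max acc r.length) 0 := by omega
    have := fold_zipAdd_getD stepData [] i
    simp only [List.getD] at this ⊢
    rw [List.getElem_map, List.getElem_range]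
    have hg : (stepData.foldl zipAdd [])[i]?.getD 0 = (stepData.foldl zipAdd [])[i] := by
      rw [List.getElem?_eq_getElem h1]; rfl
    rw [← hg, this]
    simp

-- ===== VERDICT (by name: the statement is the Claim_ definition above) =====
theorem tenkSteps_spec : Claim_equal_tenkSteps := by
  intro stepData _
  unfold Spec_tenkSteps tenkSteps tenkSteps_alt
  have hrow : ∀ (rows : List (List Int)) (dt : List Int),
      rows.foldl tenkStepsRow dt = rows.foldl zipAdd dt := by
    intro rows
    induction rows with
    | nil => intro dt; rfl
    | cons r rows ih => intro dt; simp only [List.foldl_cons, tenkStepsRow_eq, ih]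
  simp only [hrow, day_total_eq stepData, List.foldl_map]
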